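-- pv_equiv track=rewrite | github.com/Liuguanli/LBMC | python/query_aware.py | random_bit_distribution
-- ===== SOURCE A (Python) =====
-- import copy
--
-- bit_letters = ["A", "B", "C", "D", "E"]
--
-- def random_bit_distribution(old_bit_nums=[8, 8]):
--     bit_nums = copy.deepcopy(old_bit_nums)
--     res = ""
--     all_ = sum(old_bit_nums)
--     i = all_
--     dim = len(bit_nums)
--     while len(res) != all_:
--         for j in range(dim - 1, -1, -1):
--             if bit_nums[j] == 0:
--                 continue
--             else:
--                 res = res + bit_letters[j]
--                 bit_nums[j] -= 1
--     return res
-- ===== SOURCE B (Python) =====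
-- def random_bit_distribution(old_bit_nums=[8, 8]):
--     letters = ["A", "B", "C", "D", "E"]
--     cols = [ltr * n for ltr, n in zip(letters, old_bit_nums)]
--     rounds = max((len(c) for c in cols), default=0)
--     return "".join(c[r] for r in range(rounds) for c in reversed(cols) if r < len(c))
-- ===== Notes on version B (the rewrite author's own statement) =====
-- stated objective: idiomatic
-- what changed: B precomputes one letter-run per dimension and flattens their round-by-round transpose with a comprehension, instead of A's while loop that mutates a counter array and re-checks the running string length.
-- outside the precondition, e.g. on random_bit_distribution([-1, 3]): A returns 'BA', B returns 'BBB'; on random_bit_distribution([-1, 1]): A returns '', B returns 'B'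
import Mathlib
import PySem

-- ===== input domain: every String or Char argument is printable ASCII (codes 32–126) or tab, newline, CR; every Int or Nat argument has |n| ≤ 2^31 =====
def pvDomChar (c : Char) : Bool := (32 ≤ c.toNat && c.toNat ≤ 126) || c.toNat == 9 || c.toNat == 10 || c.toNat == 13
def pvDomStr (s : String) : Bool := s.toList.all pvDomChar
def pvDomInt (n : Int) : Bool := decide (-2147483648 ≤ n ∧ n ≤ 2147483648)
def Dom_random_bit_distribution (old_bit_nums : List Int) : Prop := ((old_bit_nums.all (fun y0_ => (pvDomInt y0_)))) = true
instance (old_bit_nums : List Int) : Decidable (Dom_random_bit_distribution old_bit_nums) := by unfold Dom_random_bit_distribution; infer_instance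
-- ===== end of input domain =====

-- ===== PORT A =====
-- B replaces A's counter-mutating while loop by a flat transpose of precomputed letter runs (idiomatic rewrite, same cost).
def bitLettersA : List Char := ['A', 'B', 'C', 'D', 'E']

-- inner `for j in range(dim-1,-1,-1)` over the state (bit_nums, res); j = k-1 first.
-- bn.getD k 0 is exact (k < len(bit_nums) always); bitLettersA.getD k ' ' stands for
-- bit_letters[j], whose IndexError cases (j ≥ 5 with bit_nums[j] ≠ 0) are outside Pre_.
def rbdInner : Nat → List Int × List Char → List Int × List Char
  | 0, st => st
  | k+1, (bn, res) =>
      let v := bn.getD k 0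
      if v = 0 then rbdInner k (bn, res)
      else rbdInner k (bn.set k (v - 1), res ++ [bitLettersA.getD k ' '])

-- the `while len(res) != all_` loop, fuel-bounded; inside Pre_ fuel sum+1 suffices
-- (outside Pre_ the Python loop diverges or raises and nothing is claimed).
def rbdWhile : Nat → Int → List Int × List Char → List Char
  | 0, _, (_, res) => res
  | f+1, all_, (bn, res) =>
      if (res.length : Int) = all_ then res
      else rbdWhile f all_ (rbdInner bn.length (bn, res))

def random_bit_distribution (old_bit_nums : List Int) : String :=
  String.ofList (rbdWhile (old_bit_nums.sum.toNat + 1) old_bit_nums.sum (old_bit_nums, []))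

-- ===== PORT B =====
def bitLettersB : List Char := ['A', 'B', 'C', 'D', 'E']

def random_bit_distribution_alt (old_bit_nums : List Int) : String :=
  let cols := (bitLettersB.zip old_bit_nums).map (fun p => List.replicate p.2.toNat p.1)
  let rounds := (cols.map List.length).foldl max 0
  String.ofList ((List.range rounds).flatMap (fun r => cols.reverse.filterMap (fun c => getElem? c r)))

-- ===== PRECONDITION & SPEC =====
-- Pre_ excludes negative bit counts (outside the function's natural domain: A diverges
-- on almost all of them and its rare returns there are loop accidents, see cites) and
-- nonzero counts past the five letters, on which A raises IndexError.
def Pre_random_bit_distribution (old_bit_nums : List Int) : Prop :=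
  (∀ x ∈ old_bit_nums, 0 ≤ x) ∧ (∀ x ∈ old_bit_nums.drop 5, x = 0)
instance (old_bit_nums : List Int) : Decidable (Pre_random_bit_distribution old_bit_nums) := by unfold Pre_random_bit_distribution; infer_instance

def pvWitness_random_bit_distribution : List Int := [2, 1]

def Spec_random_bit_distribution (old_bit_nums : List Int) (out : String) : Prop := out = random_bit_distribution_alt old_bit_nums
instance (old_bit_nums : List Int) (out : String) : Decidable (Spec_random_bit_distribution old_bit_nums out) := by unfold Spec_random_bit_distribution; infer_instance

-- ===== CLAIM (what is proved, stated in full; the proofs are below) =====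
def Claim_equal_random_bit_distribution : Prop := ∀ (old_bit_nums : List Int), Dom_random_bit_distribution old_bit_nums → Pre_random_bit_distribution old_bit_nums → Spec_random_bit_distribution old_bit_nums (random_bit_distribution old_bit_nums)

-- ===== LEMMAS AND PROOFS =====

-- decrement of one counter in one round of A
def pvSub1 (x : Int) : Int := if x = 0 then x else x - 1

-- the characters A's inner loop appends (j = k-1 down to 0)
def rowK : Nat → List Int → List Char
  | 0, _ => []
  | k+1, bn => (if bn.getD k 0 = 0 then [] else [bitLettersA.getD k ' ']) ++ rowK k bn

-- the counter array after A's inner loop has processed j = k-1 down to 0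
def decK : Nat → List Int → List Int
  | 0, bn => bn
  | k+1, bn => decK k (if bn.getD k 0 = 0 then bn else bn.set k (bn.getD k 0 - 1))

def stepF (bn : List Int) : List Int := decK bn.length bn

-- B's pieces, named
def colsOf (bn : List Int) : List (List Char) :=
  (bitLettersB.zip bn).map (fun p => List.replicate p.2.toNat p.1)
def rOf (bn : List Int) : Nat := ((colsOf bn).map List.length).foldl max 0
def bBody (bn : List Int) : List Char :=
  (List.range (rOf bn)).flatMap (fun r => (colsOf bn).reverse.filterMap (fun c => getElem? c r))

-- index-wise form of Pre_
def PreG (bn : List Int) : Prop :=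
  (∀ j : Nat, 0 ≤ bn.getD j 0) ∧ (∀ j : Nat, 5 ≤ j → bn.getD j 0 = 0)

lemma alt_eq (l : List Int) : random_bit_distribution_alt l = String.ofList (bBody l) := rfl

lemma pre_to_preG (l : List Int) (h : Pre_random_bit_distribution l) : PreG l := by
  constructor
  · intro j
    by_cases hj : j < l.length
    · rw [List.getD_eq_getElem l 0 hj]; exact h.1 _ (List.getElem_mem hj)
    · rw [List.getD_eq_default l 0 (by omega)]
  · intro j hj
    by_cases hjl : j < l.length
    · rw [List.getD_eq_getElem l 0 hjl]
      refine h.2 _ ?_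
      have hlt : j - 5 < (l.drop 5).length := by simp; omega
      have hmem := List.getElem_mem hlt
      rw [List.getElem_drop] at hmem
      simpa [show 5 + (j-5) = j by omega] using hmem
    · rw [List.getD_eq_default l 0 (by omega)]

lemma getD_set_ne (l : List Int) (m j : Nat) (x : Int) (h : j ≠ m) :
    (l.set m x).getD j 0 = l.getD j 0 := by
  simp [List.getD, List.getElem?_set_ne (by omega : m ≠ j)]

lemma rowK_set (k : Nat) (bn : List Int) (m : Nat) (x : Int) (h : k ≤ m) :
    rowK k (bn.set m x) = rowK k bn := by
  induction k with
  | zero => simp [rowK]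
  | succ k ih =>
    simp only [rowK, getD_set_ne bn m k x (by omega), ih (by omega)]

lemma inner_eq (k : Nat) (bn : List Int) (res : List Char) :
    rbdInner k (bn, res) = (decK k bn, res ++ rowK k bn) := by
  induction k generalizing bn res with
  | zero => simp [rbdInner, decK, rowK]
  | succ k ih =>
    show (if bn.getD k 0 = 0 then rbdInner k (bn, res)
      else rbdInner k (bn.set k (bn.getD k 0 - 1), res ++ [bitLettersA.getD k ' '])) = _
    by_cases hv : bn.getD k 0 = 0
    · rw [if_pos hv, ih]
      rw [decK, if_pos hv, rowK, if_pos hv]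
      simp
    · rw [if_neg hv, ih]
      rw [decK, if_neg hv, rowK, if_neg hv, rowK_set k bn k _ le_rfl]
      simp

lemma decK_length (k : Nat) (bn : List Int) : (decK k bn).length = bn.length := by
  induction k generalizing bn with
  | zero => rfl
  | succ k ih =>
    rw [decK, ih]
    split <;> simp

lemma decK_getD (k : Nat) (bn : List Int) (j : Nat) :
    (decK k bn).getD j 0 = if j < k then pvSub1 (bn.getD j 0) else bn.getD j 0 := by
  induction k generalizing bn with
  | zero => simp [decK]
  | succ k ih =>
    rw [decK]
    by_cases hv : bn.getD k 0 = 0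
    · rw [if_pos hv, ih]
      by_cases h : j < k
      · rw [if_pos h, if_pos (by omega)]
      · by_cases h2 : j = k
        · subst h2
          rw [if_neg h, if_pos (by omega), hv]
          simp [pvSub1]
        · rw [if_neg h, if_neg (by omega)]
    · rw [if_neg hv, ih]
      have hk : k < bn.length := by
        by_contra hk
        exact hv (List.getD_eq_default bn 0 (by omega))
      by_cases h : j < k
      · rw [if_pos h, if_pos (by omega), getD_set_ne bn k j _ (by omega)]
      · by_cases h2 : j = k
        · subst h2
          rw [if_neg h, if_pos (by omega)]
          have hset : (bn.set j (bn.getD j 0 - 1)).getD j 0 = bn.getD j 0 - 1 := by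
            simp [List.getD, hk]
          rw [hset]
          simp only [List.getD] at hv
          simp [pvSub1, hv]
        · rw [if_neg h, if_neg (by omega), getD_set_ne bn k j _ (by omega)]

lemma sum_set_int (l : List Int) (k : Nat) (x : Int) (h : k < l.length) :
    (l.set k x).sum = l.sum - l[k] + x := by
  rw [List.sum_set]
  simp only [h, if_true, ← List.sum_take_add_sum_drop l k, List.drop_eq_getElem_cons h,
    List.sum_cons]
  ring

lemma rowlen_sum (k : Nat) (bn : List Int) (h : k ≤ bn.length) :
    ((rowK k bn).length : Int) + (decK k bn).sum = bn.sum := by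
  induction k generalizing bn with
  | zero => simp [rowK, decK]
  | succ k ih =>
    rw [rowK, decK]
    by_cases hv : bn.getD k 0 = 0
    · rw [if_pos hv, if_pos hv]
      simpa using ih bn (by omega)
    · have hk : k < bn.length := by
        by_contra hk
        exact hv (List.getD_eq_default bn 0 (by omega))
      rw [if_neg hv, if_neg hv]
      have h1 := ih (bn.set k (bn.getD k 0 - 1)) (by simp; omega)
      rw [rowK_set k bn k _ le_rfl] at h1
      rw [sum_set_int bn k _ hk] at h1
      rw [List.getD_eq_getElem bn 0 hk] at h1 ⊢
      simp only [List.length_append, List.length_cons, List.length_nil]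
      push_cast at h1 ⊢
      omega

lemma rowK_eq (k : Nat) (bn : List Int) :
    rowK k bn = ((List.range k).filterMap
      (fun j => if bn.getD j 0 = 0 then none else some (bitLettersA.getD j ' '))).reverse := by
  induction k with
  | zero => simp [rowK]
  | succ k ih =>
    rw [rowK, ih, List.range_succ, List.filterMap_append, List.reverse_append]
    simp [List.filterMap_cons]
    split <;> simp

lemma mem_of_preG (bn : List Int) (h : ∀ j : Nat, 0 ≤ bn.getD j 0) :
    ∀ x ∈ bn, 0 ≤ x := by
  intro x hx
  obtain ⟨i, hi, rfl⟩ := List.mem_iff_getElem.mp hx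
  have := h i
  rwa [List.getD_eq_getElem bn 0 hi] at this

lemma sum_zero_mem (l : List Int) (h : ∀ x ∈ l, 0 ≤ x) (hs : l.sum = 0) :
    ∀ x ∈ l, x = 0 := by
  induction l with
  | nil => simp
  | cons a t ih =>
    have ha := h a (by simp)
    have ht : 0 ≤ t.sum := List.sum_nonneg (fun x hx => h x (by simp [hx]))
    simp only [List.sum_cons] at hs
    intro x hx
    rcases List.mem_cons.mp hx with rfl | hx'
    · omega
    · exact ih (fun y hy => h y (by simp [hy])) (by omega) x hx'

lemma getD_nonneg_sum (bn : List Int) (h : ∀ j : Nat, 0 ≤ bn.getD j 0) : 0 ≤ bn.sum := by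
  exact List.sum_nonneg (mem_of_preG bn h)

lemma sum_ne_exists (bn : List Int) (hs : bn.sum ≠ 0) :
    ∃ j : Nat, j < bn.length ∧ bn.getD j 0 ≠ 0 := by
  by_contra hno
  push_neg at hno
  apply hs
  apply List.sum_eq_zero
  intro x hx
  obtain ⟨i, hi, rfl⟩ := List.mem_iff_getElem.mp hx
  have := hno i hi
  rwa [List.getD_eq_getElem bn 0 hi] at this

lemma foldl_max_shift (l : List Nat) (a : Nat) :
    List.foldl max a l = max a (List.foldl max 0 l) := by
  induction l generalizing a with
  | nil => simp
  | cons x t ih =>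
    simp only [List.foldl_cons]
    rw [ih, ih (max 0 x)]
    omega

lemma foldl_max_zero_iff (l : List Nat) :
    List.foldl max 0 l = 0 ↔ ∀ x ∈ l, x = 0 := by
  induction l with
  | nil => simp
  | cons x t ih =>
    simp only [List.foldl_cons, List.mem_cons]
    rw [foldl_max_shift]
    constructor
    · intro h0 y hy
      rcases hy with rfl | hy
      · omega
      · exact (ih.mp (by omega)) y hy
    · intro hy
      have hx := hy x (Or.inl rfl)
      have ht := ih.mpr (fun y hyy => hy y (Or.inr hyy))
      omega

lemma foldl_max_pred (l : List Nat) :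
    List.foldl max 0 (l.map (fun x => x - 1)) = List.foldl max 0 l - 1 := by
  have aux : ∀ (t : List Nat) (a : Nat),
      List.foldl max (a-1) (t.map (fun x => x-1)) = List.foldl max a t - 1 := by
    intro t
    induction t with
    | nil => intro a; simp
    | cons x s ih =>
      intro a
      simp only [List.map_cons, List.foldl_cons]
      rw [show max (a-1) (x-1) = max a x - 1 by omega, ih]
  simpa using aux l 0

lemma colsOf_length (bn : List Int) : (colsOf bn).length = min 5 bn.length := by
  simp [colsOf, bitLettersB]

lemma colsOf_step (bn : List Int) (h : ∀ j : Nat, 0 ≤ bn.getD j 0) :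
    colsOf (stepF bn) = (colsOf bn).map List.tail := by
  have hlen : (stepF bn).length = bn.length := decK_length _ _
  apply List.ext_getElem
  · simp [colsOf, bitLettersB, hlen]
  · intro i h1 h2
    have hi : i < bn.length := by
      simp [colsOf_length, hlen] at h1
      omega
    have hi5 : i < (5:Nat) := by
      simp [colsOf_length, hlen] at h1
      omega
    simp only [colsOf, List.getElem_map, List.getElem_zip]
    rw [List.tail_replicate]
    have hstep : (stepF bn)[i]'(by omega) = pvSub1 (bn[i]'hi) := by
      have hd := decK_getD bn.length bn i
      rw [if_pos hi] at hd
      rw [List.getD_eq_getElem _ 0 (by rw [decK_length]; exact hi),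
        List.getD_eq_getElem _ 0 hi] at hd
      exact hd
    rw [hstep]
    have h0 := h i
    rw [List.getD_eq_getElem bn 0 hi] at h0
    congr 1
    unfold pvSub1
    split <;> omega

lemma rOf_step (bn : List Int) (h : ∀ j : Nat, 0 ≤ bn.getD j 0) :
    rOf (stepF bn) = rOf bn - 1 := by
  rw [rOf, rOf, colsOf_step bn h, List.map_map]
  have he : (List.length ∘ List.tail : List Char → Nat) =
      (fun n => n - 1) ∘ (List.length : List Char → Nat) := by
    funext c
    simp [List.length_tail]
  rw [he, ← List.map_map]
  exact foldl_max_pred _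

lemma rOf_pos (bn : List Int) (h : PreG bn) (hs : bn.sum ≠ 0) : 0 < rOf bn := by
  obtain ⟨j, hj, hx⟩ := sum_ne_exists bn hs
  have hj5 : j < 5 := by
    by_contra h5
    exact hx (h.2 j (by omega))
  have hjc : j < (colsOf bn).length := by
    rw [colsOf_length]
    omega
  have hcol : (colsOf bn)[j] = List.replicate ((bn[j]'hj).toNat)
      (bitLettersB[j]'(by simp [bitLettersB]; omega)) := by
    simp [colsOf, List.getElem_map, List.getElem_zip]
  have h0 := h.1 j
  rw [List.getD_eq_getElem bn 0 hj] at h0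
  rw [List.getD_eq_getElem bn 0 hj] at hx
  have hpos : 0 < ((colsOf bn)[j]).length := by
    rw [hcol, List.length_replicate]
    omega
  have hmem : ((colsOf bn)[j]).length ∈ (colsOf bn).map List.length :=
    List.mem_map_of_mem (List.getElem_mem hjc)
  have hle := (PySem.List.le_foldl_max ((colsOf bn).map List.length) 0).2 _ hmem
  rw [rOf]
  omega

lemma zip_filterMap_range (L : List Char) (bn : List Int) (g : Char → Int → Option Char) :
    (L.zip bn).filterMap (fun p => g p.1 p.2) =
      (List.range (min L.length bn.length)).filterMap
        (fun j => g (L.getD j ' ') (bn.getD j 0)) := by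
  induction L generalizing bn with
  | nil => simp
  | cons a L ih =>
    cases bn with
    | nil => simp
    | cons x bn =>
      simp only [List.zip_cons_cons, List.filterMap_cons, List.length_cons,
        Nat.succ_min_succ, List.range_succ_eq_map, List.filterMap_map]
      cases hg : g a x <;>
        simp [hg, Function.comp, Nat.succ_eq_add_one,
          ih]

lemma filterMap_range_restrict (g : Nat → Option Char) (m k : Nat) (hmk : m ≤ k)
    (h : ∀ j, m ≤ j → g j = none) :
    (List.range k).filterMap g = (List.range m).filterMap g := by
  have hk : k = m + (k - m) := by omega
  rw [hk, List.range_add, List.filterMap_append]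
  have hnil : ((List.range (k-m)).map (m + ·)).filterMap g = [] := by
    rw [List.filterMap_eq_nil_iff]
    intro a ha
    obtain ⟨j, hj, rfl⟩ := List.mem_map.mp ha
    exact h _ (by omega)
  rw [hnil, List.append_nil]

lemma row0_eq (bn : List Int) (h : PreG bn) :
    (colsOf bn).reverse.filterMap (fun c => getElem? c 0) = rowK bn.length bn := by
  rw [List.filterMap_reverse, rowK_eq]
  congr 1
  rw [colsOf, List.filterMap_map]
  have hfun : ((fun c => getElem? c 0) ∘ fun p : Char × Int => List.replicate p.2.toNat p.1)
      = fun p : Char × Int => if 0 < p.2.toNat then some p.1 else none := by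
    funext p
    simp [List.getElem?_replicate]
  rw [hfun, zip_filterMap_range bitLettersB bn (fun ch n => if 0 < n.toNat then some ch else none)]
  have hlen : bitLettersB.length = 5 := rfl
  rw [hlen]
  rw [filterMap_range_restrict
      (fun j => if bn.getD j 0 = 0 then none else some (bitLettersA.getD j ' '))
      (min 5 bn.length) bn.length (by omega) ?_]
  · apply List.filterMap_congr
    intro j hj
    have hnn := h.1 j
    by_cases hz : bn.getD j 0 = 0
    · rw [hz]
      simp
    · rw [if_neg hz, if_pos (show 0 < (bn.getD j 0).toNat by omega)]
      rfl
  · intro j hj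
    by_cases h5 : 5 ≤ bn.length
    · rw [min_eq_left h5] at hj
      exact if_pos (h.2 j (by omega))
    · rw [min_eq_right (by omega)] at hj
      exact if_pos (List.getD_eq_default bn 0 (by omega))

lemma preG_step (bn : List Int) (h : PreG bn) : PreG (stepF bn) := by
  constructor
  · intro j
    have hd := decK_getD bn.length bn j
    rw [show stepF bn = decK bn.length bn from rfl, hd]
    split
    · have := h.1 j
      unfold pvSub1
      split <;> omega
    · exact h.1 j
  · intro j hj
    have hd := decK_getD bn.length bn j
    rw [show stepF bn = decK bn.length bn from rfl, hd, h.2 j hj]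
    split <;> simp [pvSub1]

lemma bBody_nil (bn : List Int) (h : PreG bn) (hs : bn.sum = 0) : bBody bn = [] := by
  have hall : ∀ x ∈ bn, x = 0 := sum_zero_mem bn (mem_of_preG bn h.1) hs
  have hr : rOf bn = 0 := by
    rw [rOf, foldl_max_zero_iff]
    intro x hx
    obtain ⟨c, hc, rfl⟩ := List.mem_map.mp hx
    have hc' : ∃ a b, (a, b) ∈ bitLettersB.zip bn ∧ List.replicate b.toNat a = c := by
      simpa [colsOf] using hc
    obtain ⟨p1, p2, hp, rfl⟩ := hc'
    have hp2 : p2 ∈ bn := (List.of_mem_zip hp).2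
    simp [hall _ hp2]
  rw [bBody, hr]
  simp

lemma bBody_peel (bn : List Int) (h : PreG bn) (hs : bn.sum ≠ 0) :
    bBody bn = rowK bn.length bn ++ bBody (stepF bn) := by
  have hpos := rOf_pos bn h hs
  rw [bBody, bBody, rOf_step bn h.1]
  obtain ⟨R, hR⟩ : ∃ R, rOf bn = R + 1 := ⟨rOf bn - 1, by omega⟩
  rw [hR]
  simp only [Nat.add_sub_cancel]
  rw [List.range_succ_eq_map, List.flatMap_cons, row0_eq bn h, List.flatMap_map]
  have hfun : (fun a : Nat => (colsOf bn).reverse.filterMap (fun c => getElem? c a.succ))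
      = fun r : Nat => (colsOf (stepF bn)).reverse.filterMap (fun c => getElem? c r) := by
    funext r
    rw [colsOf_step bn h.1, ← List.map_reverse, List.filterMap_map]
    simp [Function.comp, List.getElem?_tail, Nat.succ_eq_add_one]
  rw [hfun]

lemma rowK_ne_nil (bn : List Int) (j : Nat) (hj : j < bn.length) (hx : bn.getD j 0 ≠ 0) :
    rowK bn.length bn ≠ [] := by
  rw [rowK_eq]
  simp only [ne_eq, List.reverse_eq_nil_iff]
  rw [List.filterMap_eq_nil_iff]
  intro hno
  have hj0 := hno j (List.mem_range.mpr hj)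
  simp at hj0
  exact hx hj0

lemma master (fuel : Nat) (bn : List Int) (res : List Char) (h : PreG bn)
    (hf : bn.sum.toNat < fuel) :
    rbdWhile fuel ((res.length : Int) + bn.sum) (bn, res) = res ++ bBody bn := by
  induction fuel generalizing bn res with
  | zero => omega
  | succ f ih =>
    rw [rbdWhile]
    by_cases hs : bn.sum = 0
    · rw [if_pos (by omega), bBody_nil bn h hs, List.append_nil]
    · rw [if_neg (by omega), inner_eq]
      have h1 : ((rowK bn.length bn).length : Int) + (stepF bn).sum = bn.sum :=
        rowlen_sum bn.length bn le_rfl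
      have hrow1 : 1 ≤ (rowK bn.length bn).length := by
        obtain ⟨j, hj, hx⟩ := sum_ne_exists bn hs
        have hne := rowK_ne_nil bn j hj hx
        have := List.length_pos_iff.mpr hne
        omega
      have hstep := preG_step bn h
      have hsum0 : 0 ≤ (stepF bn).sum := getD_nonneg_sum _ hstep.1
      have hsf : decK bn.length bn = stepF bn := rfl
      rw [hsf]
      have happly := ih (stepF bn) (res ++ rowK bn.length bn) hstep (by omega)
      have hall : (((res ++ rowK bn.length bn).length : Int) + (stepF bn).sum)
          = ((res.length : Int) + bn.sum) := by
        simp only [List.length_append]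
        push_cast
        omega
      rw [← hall, happly, bBody_peel bn h hs, ← List.append_assoc]

-- ===== VERDICT (by name: the statement is the Claim_ definition above) =====
theorem random_bit_distribution_spec : Claim_equal_random_bit_distribution := by
  intro l _hd hp
  have hg := pre_to_preG l hp
  unfold Spec_random_bit_distribution
  rw [alt_eq]
  unfold random_bit_distribution
  have hm := master (l.sum.toNat + 1) l [] hg (by omega)
  simp only [List.length_nil, Int.natCast_zero, zero_add, List.nil_append] at hm
  rw [hm]
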